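-- pv_equiv track=rewrite | github.com/BelowZeroKelvin/MCDR-Hat | Hat.py | slot_name
-- ===== SOURCE A (Python) =====
-- def slot_name(slot):
--     slots = {a: 'hotbar.' + str(a) for a in range(9)}
--     slots1 = {a: 'inventory.' + str(a - 9) for a in range(9, 35)}
--     slots2 = {
--         100: 'armor.feet',
--         101: 'armor.legs',
--         102: 'armor.chest',
--         103: 'armor.head',
--         -106: 'weapon.offhand'
--     }
--     slots.update(slots1)
--     slots.update(slots2)
--     return slots[slot]
-- ===== SOURCE B (Python) =====
-- _SPECIAL = {100: 'armor.feet', 101: 'armor.legs', 102: 'armor.chest',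
--             103: 'armor.head', -106: 'weapon.offhand'}
--
-- def slot_name(slot):
--     if 0 <= slot < 9:
--         return 'hotbar.' + str(slot)
--     if 9 <= slot < 35:
--         return 'inventory.' + str(slot - 9)
--     return _SPECIAL[slot]
-- ===== Notes on version B (the rewrite author's own statement) =====
-- stated objective: simpler
-- what changed: Replaces the two range-comprehension dict tables (rebuilt on every call) with direct range tests that compute the name arithmetically, keeping only the five armor/offhand special cases in a module-level literal dict.
import Mathlib
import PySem

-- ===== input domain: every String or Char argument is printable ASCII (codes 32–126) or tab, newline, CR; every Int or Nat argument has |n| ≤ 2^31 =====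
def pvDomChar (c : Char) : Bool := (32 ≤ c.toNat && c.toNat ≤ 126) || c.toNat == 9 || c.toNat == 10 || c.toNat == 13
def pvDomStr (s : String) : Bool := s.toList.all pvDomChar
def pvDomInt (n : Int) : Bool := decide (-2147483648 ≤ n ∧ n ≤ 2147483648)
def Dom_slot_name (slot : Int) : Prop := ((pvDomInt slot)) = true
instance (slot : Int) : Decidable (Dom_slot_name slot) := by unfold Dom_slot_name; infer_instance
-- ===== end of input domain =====

-- B drops A's per-call dict tables: direct range tests compute the name arithmetically (objective: simpler/constant-faster).

-- ===== PORT A =====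
-- slots[slot] raises KeyError for keys not present; Pre_ excludes those, so getD is only reached on present keys.
def slot_name (slot : Int) : String :=
  let slots := (PySem.List.pyRange 0 9 1).foldl
    (fun d a => d.insert a ("hotbar." ++ PySem.Int.toStr a)) PySem.Dict.empty
  let slots1 := (PySem.List.pyRange 9 35 1).foldl
    (fun d a => d.insert a ("inventory." ++ PySem.Int.toStr (a - 9))) PySem.Dict.empty
  let slots2 : PySem.Dict Int String := PySem.Dict.ofList
    [(100, "armor.feet"), (101, "armor.legs"), (102, "armor.chest"),
     (103, "armor.head"), (-106, "weapon.offhand")]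
  let slots := slots.update slots1.items
  let slots := slots.update slots2.items
  (slots.get? slot).getD ""

-- ===== PORT B =====
def pvSpecial : PySem.Dict Int String := PySem.Dict.ofList
  [(100, "armor.feet"), (101, "armor.legs"), (102, "armor.chest"),
   (103, "armor.head"), (-106, "weapon.offhand")]

def slot_name_alt (slot : Int) : String :=
  if 0 ≤ slot ∧ slot < 9 then "hotbar." ++ PySem.Int.toStr slot
  else if 9 ≤ slot ∧ slot < 35 then "inventory." ++ PySem.Int.toStr (slot - 9)
  else (pvSpecial.get? slot).getD ""

-- ===== PRECONDITION & SPEC =====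
-- Pre_ excludes exactly the slots not in the table, where A raises KeyError (and B raises KeyError too).
def Pre_slot_name (slot : Int) : Prop :=
  (0 ≤ slot ∧ slot < 35) ∨ slot = 100 ∨ slot = 101 ∨ slot = 102 ∨ slot = 103 ∨ slot = -106
instance (slot : Int) : Decidable (Pre_slot_name slot) := by unfold Pre_slot_name; infer_instance
def pvWitness_slot_name : Int := (5)
def Spec_slot_name (slot : Int) (out : String) : Prop := out = slot_name_alt slot
instance (slot : Int) (out : String) : Decidable (Spec_slot_name slot out) := by unfold Spec_slot_name; infer_instance

-- ===== CLAIM (what is proved, stated in full; the proofs are below) =====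
def Claim_equal_slot_name : Prop := ∀ (slot : Int), Dom_slot_name slot → Pre_slot_name slot → Spec_slot_name slot (slot_name slot)

-- ===== LEMMAS AND PROOFS =====
set_option maxRecDepth 4096

-- ===== VERDICT (by name: the statement is the Claim_ definition above) =====
theorem slot_name_spec : Claim_equal_slot_name := by
  intro slot _ hpre
  unfold Spec_slot_name
  rcases hpre with ⟨h0, h1⟩ | h | h | h | h | h
  · interval_cases slot <;> decide
  all_goals subst h; decide
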